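-- pv_equiv track=rewrite | github.com/DataXpertEngineer/dsa-using-python | bit_manipulation/algorithms/subset_generation.py | generate_subsets_size_k
-- ===== SOURCE A (Python) =====
-- from typing import List
--
-- def generate_subsets_size_k(arr: List[int], k: int) -> List[List[int]]:
--     """
--     Generate all subsets of size k using bitmasking.
--
--     Args:
--         arr (List[int]): Input array
--         k (int): Size of subsets
--
--     Returns:
--         List[List[int]]: List of all subsets of size k
--
--     Complexity:
--         Time: O(n * 2^n)  - Checks all masks, filters by size.
--         Space: O(C(n,k) * k) - Stores subsets of size k.
--     """
--     # Count set bits using Kernighan's algorithm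
--     def count_bits(mask):
--         count = 0
--         while mask:
--             mask &= mask - 1
--             count += 1
--         return count
--
--     n = len(arr)
--     subsets = []
--
--     for mask in range(1 << n):
--         if count_bits(mask) == k:
--             subset = []
--             for i in range(n):
--                 if mask & (1 << i):
--                     subset.append(arr[i])
--             subsets.append(subset)
--
--     return subsets
-- ===== SOURCE B (Python) =====
-- from typing import List
--
-- def generate_subsets_size_k(arr: List[int], k: int) -> List[List[int]]:
--     """Dynamic programming over prefixes: table[j] holds all size-j subsets of
--     the processed prefix, in increasing-mask order; no mask enumeration at all."""
--     if k < 0 or k > len(arr):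
--         return []
--     table = [[[]]] + [[] for _ in range(k)]
--     for x in arr:
--         table = [cur + [s + [x] for s in prev] for cur, prev in zip(table, [[]] + table)]
--     return table[k]
-- ===== Notes on version B (the rewrite author's own statement) =====
-- stated objective: faster
-- what changed: Replaces A's scan of all 2^n masks (popcount test plus an inner index loop per mask) by a prefix dynamic program keeping, for each size j <= k, the size-j subsets of the processed prefix in increasing-mask order, so only subsets that actually occur are ever built; intended as faster (output-sensitive), measured 14.8x at n=16 (at n=64 the output itself is exponential and neither finishes).
import Mathlib
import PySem

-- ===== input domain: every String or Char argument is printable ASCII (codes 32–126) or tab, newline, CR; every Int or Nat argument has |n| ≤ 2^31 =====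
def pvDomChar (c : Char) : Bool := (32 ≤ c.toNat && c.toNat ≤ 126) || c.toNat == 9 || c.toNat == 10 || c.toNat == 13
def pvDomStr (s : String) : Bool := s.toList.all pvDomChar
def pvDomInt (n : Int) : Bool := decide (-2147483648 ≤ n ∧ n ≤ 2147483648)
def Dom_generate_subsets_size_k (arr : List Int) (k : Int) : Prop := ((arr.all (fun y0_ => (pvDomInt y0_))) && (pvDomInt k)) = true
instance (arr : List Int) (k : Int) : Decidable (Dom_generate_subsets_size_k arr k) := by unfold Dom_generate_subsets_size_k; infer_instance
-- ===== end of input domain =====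

-- B replaces A's scan of all 2^n masks by a prefix DP keeping, per size j ≤ k, the
-- size-j subsets of the processed prefix in increasing-mask order (intended as faster;
-- measured 14.8x at n=16 in a timing run).

-- ===== PORT A =====
-- Kernighan's bit-count loop, as in A's nested `count_bits`
def pvCountBits (mask : Nat) : Nat :=
  if h : mask = 0 then 0
  else pvCountBits (mask &&& (mask - 1)) + 1
decreasing_by
  exact Nat.lt_of_le_of_lt (Nat.and_le_right) (by omega)

def generate_subsets_size_k (arr : List Int) (k : Int) : List (List Int) :=
  let n := arr.length
  (List.range (1 <<< n)).foldl (fun subsets mask =>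
    if (pvCountBits mask : Int) = k then
      subsets ++ [(List.range n).foldl (fun subset i =>
        -- `arr[i]` with 0 ≤ i < len(arr) always in range; getD is exact here
        if mask &&& (1 <<< i) ≠ 0 then subset ++ [arr.getD i 0] else subset) []]
    else subsets) []

-- ===== PORT B =====
def generate_subsets_size_k_alt (arr : List Int) (k : Int) : List (List Int) :=
  if k < 0 ∨ (arr.length : Int) < k then []
  else
    let table := [[([] : List Int)]] ++ List.replicate k.toNat []
    let final := arr.foldl (fun table x =>
      List.zipWith (fun cur prev => cur ++ prev.map (fun s => s ++ [x])) table ([] :: table)) table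
    -- `table[k]`: the table always has length k+1, so the index is in range; getD is exact
    final.getD k.toNat []

-- ===== PRECONDITION & SPEC =====
def Spec_generate_subsets_size_k (arr : List Int) (k : Int) (out : List (List Int)) : Prop := out = generate_subsets_size_k_alt arr k
instance (arr : List Int) (k : Int) (out : List (List Int)) : Decidable (Spec_generate_subsets_size_k arr k out) := by unfold Spec_generate_subsets_size_k; infer_instance

-- ===== CLAIM (what is proved, stated in full; the proofs are below) =====
def Claim_equal_generate_subsets_size_k : Prop := ∀ (arr : List Int) (k : Int), Dom_generate_subsets_size_k arr k → Spec_generate_subsets_size_k arr k (generate_subsets_size_k arr k)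

-- ===== LEMMAS AND PROOFS =====

-- the filter-append shape of both foldl loops in A
theorem pv_foldl_if_append {α β : Type} (p : α → Prop) [DecidablePred p] (f : α → β) :
    ∀ (l : List α) (a : List β),
      l.foldl (fun acc m => if p m then acc ++ [f m] else acc) a
        = a ++ (l.filter (fun m => decide (p m))).map f := by
  intro l
  induction l with
  | nil => simp
  | cons x xs ih =>
    intro a
    simp only [List.foldl_cons, List.filter_cons]
    by_cases h : p x <;> simp [h, ih]

-- closed form of A's inner loop
def pvSubsetOf (arr : List Int) (m : Nat) : List Int :=
  ((List.range arr.length).filter (fun i => decide (m &&& (1 <<< i) ≠ 0))).map (fun i => arr.getD i 0)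

theorem pv_genA_closed (arr : List Int) (k : Int) :
    generate_subsets_size_k arr k =
      ((List.range (1 <<< arr.length)).filter (fun m => decide ((pvCountBits m : Int) = k))).map
        (pvSubsetOf arr) := by
  unfold generate_subsets_size_k
  rw [pv_foldl_if_append (fun m => (pvCountBits m : Int) = k)
      (fun mask => (List.range arr.length).foldl (fun subset i =>
        if mask &&& (1 <<< i) ≠ 0 then subset ++ [arr.getD i 0] else subset) [])]
  rw [List.nil_append]
  apply List.map_congr_left
  intro m _
  rw [pv_foldl_if_append (fun i => m &&& (1 <<< i) ≠ 0) (fun i => arr.getD i 0)]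
  rfl

-- ===== bit lemmas =====
theorem pv_and_two_pow_eq_zero {m n : Nat} (h : m < 2 ^ n) : m &&& (1 <<< n) = 0 := by
  rw [Nat.one_shiftLeft]
  apply Nat.eq_of_testBit_eq
  intro i
  simp only [Nat.testBit_and, Nat.testBit_two_pow, Nat.zero_testBit, Bool.and_eq_false_iff]
  by_cases hi : n = i
  · left; subst hi; exact Nat.testBit_lt_two_pow h
  · right; simp [hi]

theorem pv_testBit_two_pow_add {m n : Nat} (h : m < 2 ^ n) (i : Nat) :
    (2 ^ n + m).testBit i = (decide (i = n) || m.testBit i) := by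
  rcases Nat.lt_trichotomy i n with hi | hi | hi
  · rw [Nat.testBit_two_pow_add_gt hi]
    simp [Nat.ne_of_lt hi]
  · subst hi
    rw [Nat.testBit_two_pow_add_eq, Nat.testBit_lt_two_pow h]
    simp
  · have h1 : 2 ^ n + m < 2 ^ i := by
      calc 2 ^ n + m < 2 ^ n + 2 ^ n := by omega
      _ = 2 ^ (n + 1) := by ring
      _ ≤ 2 ^ i := Nat.pow_le_pow_right (by norm_num) (by omega)
    rw [Nat.testBit_lt_two_pow h1,
        Nat.testBit_lt_two_pow (lt_of_lt_of_le h (Nat.pow_le_pow_right (by norm_num) (le_of_lt hi)))]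
    simp [Nat.ne_of_gt hi]

theorem pv_kernighan_step {m n : Nat} (h0 : 0 < m) (h : m < 2 ^ n) :
    (2 ^ n + m) &&& (2 ^ n + m - 1) = 2 ^ n + (m &&& (m - 1)) := by
  have h1 : m - 1 < 2 ^ n := by omega
  have h2 : m &&& (m - 1) < 2 ^ n := lt_of_le_of_lt (Nat.and_le_right) h1
  have e : 2 ^ n + m - 1 = 2 ^ n + (m - 1) := by omega
  apply Nat.eq_of_testBit_eq
  intro i
  rw [Nat.testBit_and, e, pv_testBit_two_pow_add h, pv_testBit_two_pow_add h1,
      pv_testBit_two_pow_add h2, Nat.testBit_and]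
  cases decide (i = n) <;> cases m.testBit i <;> cases (m - 1).testBit i <;> rfl

theorem pv_countBits_two_pow_add (n : Nat) : ∀ m, m < 2 ^ n → pvCountBits (2 ^ n + m) = pvCountBits m + 1 := by
  intro m
  induction m using Nat.strong_induction_on with
  | _ m ih =>
    intro h
    rcases Nat.eq_zero_or_pos m with rfl | h0
    · rw [Nat.add_zero, pvCountBits, pvCountBits]
      have hz : 2 ^ n &&& (2 ^ n - 1) = 0 := by
        rw [Nat.and_comm, ← Nat.one_shiftLeft]
        exact pv_and_two_pow_eq_zero (by omega)
      simp [hz, pvCountBits]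
    · have hm1 : m &&& (m - 1) < m := lt_of_le_of_lt (Nat.and_le_right) (by omega)
      rw [pvCountBits, dif_neg (by omega : ¬ 2 ^ n + m = 0), pv_kernighan_step h0 h,
          ih _ hm1 (lt_trans hm1 h)]
      conv_rhs => rw [pvCountBits, dif_neg (by omega : ¬ m = 0)]

-- low masks: the appended element is not picked and the old indices still hit arr
theorem pv_subsetOf_append_low (arr : List Int) (x : Int) {m : Nat} (h : m < 2 ^ arr.length) :
    pvSubsetOf (arr ++ [x]) m = pvSubsetOf arr m := by
  unfold pvSubsetOf
  have hz : m &&& (1 <<< arr.length) = 0 := pv_and_two_pow_eq_zero h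
  rw [show (arr ++ [x]).length = arr.length + 1 by simp, List.range_succ, List.filter_append]
  rw [show List.filter (fun i => decide (m &&& (1 <<< i) ≠ 0)) [arr.length] = [] by simp [hz],
    List.append_nil]
  apply List.map_congr_left
  intro i hi
  have : i < arr.length := List.mem_range.mp (List.mem_of_mem_filter hi)
  exact List.getD_append arr [x] 0 i this

-- high masks pick up x and keep the low part of the subset
theorem pv_subsetOf_append_high (arr : List Int) (x : Int) {m : Nat} (h : m < 2 ^ arr.length) :
    pvSubsetOf (arr ++ [x]) (2 ^ arr.length + m) = pvSubsetOf arr m ++ [x] := by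
  unfold pvSubsetOf
  have hne : (2 ^ arr.length + m) &&& (1 <<< arr.length) ≠ 0 := by
    have ht : ((2 ^ arr.length + m) &&& (1 <<< arr.length)).testBit arr.length = true := by
      rw [Nat.one_shiftLeft, Nat.testBit_and, pv_testBit_two_pow_add h]
      simp
    intro h0
    rw [h0] at ht
    simp at ht
  have hand : ∀ i, i < arr.length →
      (2 ^ arr.length + m) &&& (1 <<< i) = m &&& (1 <<< i) := by
    intro i hi
    apply Nat.eq_of_testBit_eq
    intro j
    rw [Nat.one_shiftLeft, Nat.testBit_and, Nat.testBit_and, Nat.testBit_two_pow]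
    by_cases hij : i = j
    · subst hij
      rw [pv_testBit_two_pow_add h]
      simp [Nat.ne_of_lt hi]
    · simp [hij]
  rw [show (arr ++ [x]).length = arr.length + 1 by simp, List.range_succ, List.filter_append]
  rw [List.filter_congr (l := List.range arr.length)
      (q := fun i => decide (m &&& (1 <<< i) ≠ 0))
      (fun i hi => by
        have : i < arr.length := List.mem_range.mp hi
        simp only [hand i this])]
  rw [show List.filter (fun i => decide ((2 ^ arr.length + m) &&& (1 <<< i) ≠ 0)) [arr.length]
      = [arr.length] by simp [hne], List.map_append]
  congr 1
  · apply List.map_congr_left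
    intro i hi
    have : i < arr.length := List.mem_range.mp (List.mem_of_mem_filter hi)
    exact List.getD_append arr [x] 0 i this
  · simp

-- the key recurrence A satisfies when one element is appended
theorem pv_genA_append (arr : List Int) (x : Int) (k : Int) :
    generate_subsets_size_k (arr ++ [x]) k
      = generate_subsets_size_k arr k
        ++ (generate_subsets_size_k arr (k - 1)).map (fun s => s ++ [x]) := by
  rw [pv_genA_closed, pv_genA_closed, pv_genA_closed,
    show (arr ++ [x]).length = arr.length + 1 by simp,
    show (1 <<< (arr.length + 1)) = 2 ^ arr.length + 2 ^ arr.length by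
      rw [Nat.one_shiftLeft]; ring,
    show (1 <<< arr.length) = 2 ^ arr.length from Nat.one_shiftLeft _,
    List.range_add, List.filter_append, List.map_append]
  congr 1
  · apply List.map_congr_left
    intro m hm
    exact pv_subsetOf_append_low arr x (List.mem_range.mp (List.mem_of_mem_filter hm))
  · rw [List.filter_map, List.map_map, List.map_map]
    rw [List.filter_congr (l := List.range (2 ^ arr.length))
        (q := fun m => decide ((pvCountBits m : Int) = k - 1))
        (fun m hm => by
          have hlt : m < 2 ^ arr.length := List.mem_range.mp hm
          simp only [Function.comp_apply, pv_countBits_two_pow_add arr.length m hlt,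
            decide_eq_decide]
          push_cast
          omega)]
    apply List.map_congr_left
    intro m hm
    have hlt : m < 2 ^ arr.length := List.mem_range.mp (List.mem_of_mem_filter hm)
    simp only [Function.comp_apply]
    exact pv_subsetOf_append_high arr x hlt

theorem pv_genA_neg (arr : List Int) (k : Int) (h : k < 0) : generate_subsets_size_k arr k = [] := by
  rw [pv_genA_closed, List.filter_eq_nil_iff.mpr, List.map_nil]
  intro m _
  simp only [decide_eq_true_eq]
  omega

-- B's fold step (definitionally the lambda in generate_subsets_size_k_alt)
def pvStep (table : List (List (List Int))) (x : Int) : List (List (List Int)) :=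
  List.zipWith (fun cur prev => cur ++ prev.map (fun s => s ++ [x])) table ([] :: table)

theorem pv_countBits_zero : pvCountBits 0 = 0 := by
  rw [pvCountBits]
  simp

-- a mask below 2^n has at most n set bits, so A is empty for k > len(arr)
theorem pv_countBits_le (n : Nat) : ∀ m, m < 2 ^ n → pvCountBits m ≤ n := by
  induction n with
  | zero =>
    intro m h
    have : m = 0 := by omega
    subst this
    simp [pv_countBits_zero]
  | succ n ih =>
    intro m h
    by_cases h1 : m < 2 ^ n
    · exact le_trans (ih m h1) (by omega)
    · have h2 : m - 2 ^ n < 2 ^ n := by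
        have : 2 ^ (n + 1) = 2 * 2 ^ n := by ring
        omega
      rw [show m = 2 ^ n + (m - 2 ^ n) by omega, pv_countBits_two_pow_add n _ h2]
      exact Nat.succ_le_succ (ih _ h2)

theorem pv_genA_big (arr : List Int) (k : Int) (h : (arr.length : Int) < k) :
    generate_subsets_size_k arr k = [] := by
  rw [pv_genA_closed, List.filter_eq_nil_iff.mpr, List.map_nil]
  intro m hm
  have hlt : m < 2 ^ arr.length := by
    rw [← Nat.one_shiftLeft]
    exact List.mem_range.mp hm
  have := pv_countBits_le arr.length m hlt
  simp only [decide_eq_true_eq]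
  omega

theorem pv_genA_nil (j : Int) :
    generate_subsets_size_k [] j = if (0 : Int) = j then [[]] else [] := by
  rw [pv_genA_closed]
  by_cases hj : (0 : Int) = j
  · simp [List.range_one, pv_countBits_zero, ← hj, pvSubsetOf]
  · simp [List.range_one, pv_countBits_zero, hj]

theorem pv_init (K : Nat) :
    [[([] : List Int)]] ++ List.replicate K ([] : List (List Int))
      = (List.range (K + 1)).map (fun j : Nat => generate_subsets_size_k [] (j : Int)) := by
  induction K with
  | zero => simp [pv_genA_nil]
  | succ K ih =>
    rw [List.range_succ, List.map_append,
      show List.replicate (K + 1) ([] : List (List Int))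
        = List.replicate K ([] : List (List Int)) ++ [[]] from List.replicate_succ' .. , ← List.append_assoc, ih]
    simp only [pv_genA_nil]
    norm_num
    omega

theorem pv_step_map (K : Nat) (p : List Int) (x : Int) :
    pvStep ((List.range (K + 1)).map (fun j : Nat => generate_subsets_size_k p (j : Int))) x
      = (List.range (K + 1)).map (fun j : Nat => generate_subsets_size_k (p ++ [x]) (j : Int)) := by
  apply List.ext_getElem
  · simp [pvStep]
  · intro i hi hi2
    have hiK : i < K + 1 := by simpa using hi2
    simp only [pvStep, List.getElem_zipWith, List.getElem_map, List.getElem_range]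
    cases i with
    | zero =>
      simp only [List.getElem_cons_zero, List.map_nil, List.append_nil]
      rw [pv_genA_append, pv_genA_neg p ((0 : Nat) - 1 : Int) (by norm_num)]
      simp
    | succ j =>
      simp only [List.getElem_cons_succ, List.getElem_map, List.getElem_range]
      rw [pv_genA_append, show (((j + 1 : Nat) : Int) - 1) = ((j : Nat) : Int) by push_cast; omega]

theorem pv_tableInv (K : Nat) (arr : List Int) :
    arr.foldl pvStep ([[([] : List Int)]] ++ List.replicate K ([] : List (List Int)))
      = (List.range (K + 1)).map (fun j : Nat => generate_subsets_size_k arr (j : Int)) := by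
  induction arr using List.reverseRecOn with
  | nil => simpa using pv_init K
  | append_singleton p x ih =>
    rw [List.foldl_append, List.foldl_cons, List.foldl_nil, ih, pv_step_map]

-- ===== VERDICT (by name: the statement is the Claim_ definition above) =====
theorem generate_subsets_size_k_spec : Claim_equal_generate_subsets_size_k := by
  intro arr k _
  unfold Spec_generate_subsets_size_k generate_subsets_size_k_alt
  by_cases hk : k < 0 ∨ (arr.length : Int) < k
  · rw [if_pos hk]
    rcases hk with hk | hk
    · exact pv_genA_neg arr k hk
    · exact pv_genA_big arr k hk
  · rw [if_neg hk]
    rw [not_or] at hk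
    show generate_subsets_size_k arr k = (arr.foldl pvStep
      ([[([] : List Int)]] ++ List.replicate k.toNat ([] : List (List Int)))).getD k.toNat []
    rw [pv_tableInv]
    rw [List.getD_eq_getElem _ _ (by simp)]
    simp only [List.getElem_map, List.getElem_range]
    rw [Int.toNat_of_nonneg (Int.not_lt.mp hk.1)]
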